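-- pv_equiv track=rewrite | github.com/AwesomeArunava/Leetcode-Solved-Questions | 1122-relative-sort-array/1122-relative-sort-array.py | relativeSortArray
-- ===== SOURCE A (Python) =====
-- from typing import List
--
-- def relativeSortArray(arr1: List[int], arr2: List[int]) -> List[int]:
--     output=[]
--     extra=arr1.copy()
--
--     for i in arr2:
--         for j in arr1:
--             if i == j:
--                 output.append(j)
--     extra.sort()
--
--     for i in output:
--         for j in extra:
--             if i==j:
--                 extra.remove(j)
--
--     return output+extra
-- ===== SOURCE B (Python) =====
-- from typing import List
-- from collections import Counter
--
-- def relativeSortArray(arr1: List[int], arr2: List[int]) -> List[int]: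
--     cnt = Counter(arr1)
--     seen = set(arr2)
--     out = []
--     for v in arr2:
--         out += [v] * cnt[v]
--     out += sorted(x for x in arr1 if x not in seen)
--     return out
-- ===== Notes on version B (the rewrite author's own statement) =====
-- stated objective: faster
-- what changed: Replaces the nested arr2-by-arr1 scan and the quadratic mutate-while-iterating remove passes with a Counter and a set: emit each arr2 value count-many times, then append the sorted elements not in arr2.
import Mathlib
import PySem

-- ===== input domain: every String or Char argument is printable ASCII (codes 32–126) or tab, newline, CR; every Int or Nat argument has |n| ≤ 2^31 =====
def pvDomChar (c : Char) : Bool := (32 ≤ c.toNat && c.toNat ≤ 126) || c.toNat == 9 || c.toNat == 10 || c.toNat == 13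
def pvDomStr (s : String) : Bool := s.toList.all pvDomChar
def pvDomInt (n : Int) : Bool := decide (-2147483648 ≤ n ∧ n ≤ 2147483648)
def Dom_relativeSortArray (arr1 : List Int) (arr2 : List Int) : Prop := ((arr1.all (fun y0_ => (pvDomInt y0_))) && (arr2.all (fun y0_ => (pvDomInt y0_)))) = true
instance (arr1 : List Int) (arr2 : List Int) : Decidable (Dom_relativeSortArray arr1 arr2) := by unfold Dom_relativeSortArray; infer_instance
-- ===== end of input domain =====

-- B replaces A's nested scans and quadratic remove passes with a counter, a set and one sort of the leftovers (faster).

-- ===== PORT A =====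

-- Python's `for j in extra: if i==j: extra.remove(j)` iterates by index over the list
-- it mutates: at index k, if the element equals i, the FIRST occurrence of that value is
-- removed and iteration continues at k+1 on the shortened list; it stops when the index
-- reaches the current length.  `remove` is only reached when the value is present, so the
-- `.getD ex` default of `remove?` is never taken.
def pvRemovePass (i : Int) (ex : List Int) (k : Nat) : List Int :=
  if h : k < ex.length then
    if ex[k] = i then pvRemovePass i ((PySem.List.remove? ex i).getD ex) (k + 1)
    else pvRemovePass i ex (k + 1)
  else ex
termination_by ex.length - k
decreasing_by
  · have hmem : i ∈ ex := by
      rename_i hk; exact hk ▸ List.getElem_mem h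
    simp only [PySem.List.remove?_eq_some_erase ex i hmem, Option.getD_some]
    have := List.length_erase_of_mem hmem
    omega
  · omega

def relativeSortArray (arr1 : List Int) (arr2 : List Int) : List Int :=
  -- output=[]; for i in arr2: for j in arr1: if i == j: output.append(j)
  let output := arr2.foldl (fun out i =>
      arr1.foldl (fun out j => if i = j then out ++ [j] else out) out) []
  -- extra = arr1.copy(); extra.sort()
  let extra := PySem.List.sorted arr1 (fun x => x) false
  -- for i in output: for j in extra: if i==j: extra.remove(j)
  let extra := output.foldl (fun ex i => pvRemovePass i ex 0) extra
  output ++ extra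

-- ===== PORT B =====

def relativeSortArray_alt (arr1 : List Int) (arr2 : List Int) : List Int :=
  let cnt := PySem.Dict.counter arr1
  let seen := PySem.Set.ofList arr2
  let out := arr2.foldl (fun out v => out ++ List.replicate (cnt.getD v 0).toNat v) []
  out ++ PySem.List.sorted (arr1.filter (fun x => !(PySem.Set.contains seen x))) (fun x => x) false

-- ===== PRECONDITION & SPEC =====
def Spec_relativeSortArray (arr1 : List Int) (arr2 : List Int) (out : List Int) : Prop := out = relativeSortArray_alt arr1 arr2
instance (arr1 : List Int) (arr2 : List Int) (out : List Int) : Decidable (Spec_relativeSortArray arr1 arr2 out) := by unfold Spec_relativeSortArray; infer_instance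

-- ===== CLAIM (what is proved, stated in full; the proofs are below) =====
def Claim_equal_relativeSortArray : Prop := ∀ (arr1 : List Int) (arr2 : List Int), Dom_relativeSortArray arr1 arr2 → Spec_relativeSortArray arr1 arr2 (relativeSortArray arr1 arr2)

-- ===== LEMMAS AND PROOFS =====

-- A's inner scan over arr1 appends exactly (count of i in arr1) copies of i.
theorem pv_inner_eq_replicate (l : List Int) (i : Int) (acc : List Int) :
    l.foldl (fun out j => if i = j then out ++ [j] else out) acc
      = acc ++ List.replicate (l.count i) i := by
  induction l generalizing acc with
  | nil => simp
  | cons j t ih =>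
    by_cases h : i = j
    · subst h
      rw [List.foldl_cons, if_pos rfl, ih, List.count_cons_self, List.append_assoc,
        List.singleton_append, ← List.replicate_succ]
    · rw [List.foldl_cons, if_neg h, ih, List.count_cons_of_ne (Ne.symm h)]

-- The common "output" prefix of both ports.
theorem pv_output_eq_flatMap (arr1 arr2 : List Int) :
    arr2.foldl (fun out i =>
        arr1.foldl (fun out j => if i = j then out ++ [j] else out) out) []
      = arr2.flatMap (fun i => List.replicate (arr1.count i) i) := by
  have : ∀ (l : List Int) (acc : List Int),
      l.foldl (fun out i =>
        arr1.foldl (fun out j => if i = j then out ++ [j] else out) out) acc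
        = acc ++ l.flatMap (fun i => List.replicate (arr1.count i) i) := by
    intro l
    induction l with
    | nil => simp
    | cons a t ih =>
      intro acc
      rw [List.foldl_cons, pv_inner_eq_replicate, ih, List.flatMap_cons,
        ← List.append_assoc]
  simpa using this arr2 []

theorem pv_mem_output (arr1 arr2 : List Int) (x : Int) :
    x ∈ arr2.flatMap (fun i => List.replicate (arr1.count i) i) ↔ x ∈ arr2 ∧ x ∈ arr1 := by
  simp only [List.mem_flatMap, List.mem_replicate]
  constructor
  · rintro ⟨i, hi, hc, rfl⟩
    exact ⟨hi, List.count_pos_iff.mp (Nat.pos_of_ne_zero hc)⟩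
  · rintro ⟨h2, h1⟩
    exact ⟨x, h2, (List.count_pos_iff.mpr h1).ne', rfl⟩

theorem pv_count_output_ge (arr1 arr2 : List Int) (x : Int) (hx : x ∈ arr2) :
    arr1.count x ≤ (arr2.flatMap (fun i => List.replicate (arr1.count i) i)).count x := by
  obtain ⟨p, s, rfl⟩ := List.append_of_mem hx
  rw [List.flatMap_append, List.flatMap_cons, List.count_append, List.count_append]
  have : (List.replicate (arr1.count x) x).count x = arr1.count x := by
    simp
  omega

-- pvRemovePass only deletes copies of i …
theorem pv_pass_count_ne (i v : Int) (hvi : v ≠ i) :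
    ∀ (ex : List Int) (k : Nat), (pvRemovePass i ex k).count v = ex.count v := by
  intro ex k
  fun_induction pvRemovePass i ex k with
  | case1 ex k h hk ih =>
    have hmem : i ∈ ex := hk ▸ List.getElem_mem h
    rw [ih]
    rw [PySem.List.remove?_eq_some_erase ex i hmem, Option.getD_some,
      List.count_erase_of_ne hvi]
  | case2 ex k h hk ih => exact ih
  | case3 ex k h => rfl

-- … and never adds any.
theorem pv_pass_count_le (i : Int) :
    ∀ (ex : List Int) (k : Nat), (pvRemovePass i ex k).count i ≤ ex.count i := by
  intro ex k
  fun_induction pvRemovePass i ex k with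
  | case1 ex k h hk ih =>
    have hmem : i ∈ ex := hk ▸ List.getElem_mem h
    rw [PySem.List.remove?_eq_some_erase ex i hmem, Option.getD_some] at ih ⊢
    calc _ ≤ (ex.erase i).count i := ih
    _ ≤ ex.count i := by rw [List.count_erase_self]; omega
  | case2 ex k h hk ih => exact ih
  | case3 ex k h => exact le_refl _

-- A pass that still sees a copy of i at or after its index removes at least one.
theorem pv_pass_count_lt_aux (i : Int) :
    ∀ (ex : List Int) (k : Nat),
      (∃ m, k ≤ m ∧ ∃ h : m < ex.length, ex[m] = i) →
      (pvRemovePass i ex k).count i < ex.count i := by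
  intro ex k
  fun_induction pvRemovePass i ex k with
  | case1 ex k h hk ih =>
    intro _
    have hmem : i ∈ ex := hk ▸ List.getElem_mem h
    have hpos : 0 < ex.count i := List.count_pos_iff.mpr hmem
    have hle := pv_pass_count_le i ((PySem.List.remove? ex i).getD ex) (k + 1)
    rw [PySem.List.remove?_eq_some_erase ex i hmem, Option.getD_some] at hle ⊢
    rw [List.count_erase_self] at hle
    omega
  | case2 ex k h hk ih =>
    rintro ⟨m, hkm, hm, hmi⟩
    apply ih
    refine ⟨m, ?_, hm, hmi⟩
    rcases Nat.eq_or_lt_of_le hkm with rfl | h'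
    · exact absurd hmi hk
    · exact h'
  | case3 ex k h =>
    rintro ⟨m, hkm, hm, _⟩
    omega

theorem pv_pass_count_lt (i : Int) (ex : List Int) (hpos : 0 < ex.count i) :
    (pvRemovePass i ex 0).count i < ex.count i := by
  apply pv_pass_count_lt_aux
  have hmem : i ∈ ex := List.count_pos_iff.mp hpos
  obtain ⟨m, hm, hmi⟩ := List.getElem_of_mem hmem
  exact ⟨m, Nat.zero_le m, hm, hmi⟩

-- A pass returns a sublist of its input.
theorem pv_pass_sublist (i : Int) :
    ∀ (ex : List Int) (k : Nat), (pvRemovePass i ex k).Sublist ex := by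
  intro ex k
  fun_induction pvRemovePass i ex k with
  | case1 ex k h hk ih =>
    have hmem : i ∈ ex := hk ▸ List.getElem_mem h
    rw [PySem.List.remove?_eq_some_erase ex i hmem, Option.getD_some] at ih ⊢
    exact ih.trans (List.erase_sublist ..)
  | case2 ex k h hk ih => exact ih
  | case3 ex k h => exact List.Sublist.refl ex

-- The whole second phase, on values not mentioned in output: counts untouched.
theorem pv_fold_count_not_mem (out : List Int) (v : Int) :
    ∀ ex : List Int, v ∉ out →
      ((out.foldl (fun ex i => pvRemovePass i ex 0) ex).count v = ex.count v) := by
  induction out with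
  | nil => intro ex _; rfl
  | cons a t ih =>
    intro ex hv
    rw [List.foldl_cons, ih _ (fun h => hv (List.mem_cons_of_mem _ h)),
      pv_pass_count_ne a v (fun h => hv (h ▸ List.mem_cons_self)) ex 0]

-- On values with enough passes scheduled, every copy is removed.
theorem pv_fold_count_zero (out : List Int) (v : Int) :
    ∀ ex : List Int, ex.count v ≤ out.count v →
      ((out.foldl (fun ex i => pvRemovePass i ex 0) ex).count v = 0) := by
  induction out with
  | nil => intro ex h; simpa using Nat.le_zero.mp (by simpa using h)
  | cons a t ih =>
    intro ex h
    rw [List.foldl_cons]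
    apply ih
    by_cases hav : v = a
    · subst hav
      rcases Nat.eq_zero_or_pos (ex.count v) with h0 | hpos
      · have := pv_pass_count_le v ex 0
        omega
      · have := pv_pass_count_lt v ex hpos
        rw [List.count_cons_self] at h
        omega
    · rw [pv_pass_count_ne a v hav ex 0]
      rw [List.count_cons_of_ne (Ne.symm hav)] at h
      exact h

-- Sortedness is preserved by the second phase (each pass is a sublist).
theorem pv_fold_sorted (out : List Int) :
    ∀ ex : List Int, ex.Pairwise (· ≤ ·) →
      (out.foldl (fun ex i => pvRemovePass i ex 0) ex).Pairwise (· ≤ ·) := by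
  induction out with
  | nil => intro ex h; exact h
  | cons a t ih =>
    intro ex h
    exact ih _ (h.sublist (pv_pass_sublist a ex 0))

theorem pv_contains_eq (arr2 : List Int) (x : Int) :
    PySem.Set.contains (PySem.Set.ofList arr2) x = decide (x ∈ arr2) := by
  by_cases hx : x ∈ arr2 <;>
    simp [hx, PySem.Set.mem_ofList]

-- The leftover part: A's remove passes leave exactly the sorted elements outside arr2.
theorem pv_extra_eq (arr1 arr2 : List Int) :
    (arr2.flatMap (fun i => List.replicate (List.count i arr1) i)).foldl
        (fun ex i => pvRemovePass i ex 0) (PySem.List.sorted arr1 (fun x => x) false)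
      = PySem.List.sorted
          (arr1.filter (fun x => !(PySem.Set.contains (PySem.Set.ofList arr2) x)))
          (fun x => x) false := by
  have hfilter : arr1.filter (fun x => !(PySem.Set.contains (PySem.Set.ofList arr2) x))
      = arr1.filter (fun x => !decide (x ∈ arr2)) :=
    List.filter_congr (fun x _ => by rw [pv_contains_eq])
  rw [hfilter]
  apply PySem.List.eq_of_perm_of_pairwise_le_of_injective (fun x : Int => x)
    Function.injective_id
  · -- permutation, via counts
    rw [List.perm_iff_count]
    intro v
    have hsc : (PySem.List.sorted arr1 (fun x => x) false).count v = arr1.count v :=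
      (PySem.List.sorted_perm arr1 (fun x => x) false).count_eq v
    have hrc : (PySem.List.sorted (arr1.filter (fun x => !decide (x ∈ arr2)))
        (fun x => x) false).count v = (arr1.filter (fun x => !decide (x ∈ arr2))).count v :=
      (PySem.List.sorted_perm _ (fun x => x) false).count_eq v
    rw [hrc]
    by_cases hv2 : v ∈ arr2
    · have hr0 : (arr1.filter (fun x => !decide (x ∈ arr2))).count v = 0 := by
        rw [List.count_eq_zero]
        intro hmem
        have h2 := (List.mem_filter.mp hmem).2
        simp at h2
        exact h2 hv2
      rw [hr0]
      by_cases hv1 : v ∈ arr1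
      · apply pv_fold_count_zero
        rw [hsc]
        exact pv_count_output_ge arr1 arr2 v hv2
      · rw [pv_fold_count_not_mem _ v _
          (fun h => hv1 ((pv_mem_output arr1 arr2 v).mp h).2), hsc]
        exact List.count_eq_zero.mpr hv1
    · have hcf : List.count v (List.filter (fun x => !decide (x ∈ arr2)) arr1)
          = List.count v arr1 := List.count_filter (by simp [hv2])
      rw [pv_fold_count_not_mem _ v _
        (fun h => hv2 ((pv_mem_output arr1 arr2 v).mp h).1), hsc, hcf]
  · exact pv_fold_sorted _ _ (PySem.List.sorted_pairwise arr1 (fun x => x))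
  · exact PySem.List.sorted_pairwise _ (fun x => x)

-- ===== VERDICT (by name: the statement is the Claim_ definition above) =====
theorem relativeSortArray_spec : Claim_equal_relativeSortArray := by
  intro arr1 arr2 _
  show relativeSortArray arr1 arr2 = relativeSortArray_alt arr1 arr2
  unfold relativeSortArray relativeSortArray_alt
  simp only [pv_output_eq_flatMap, PySem.Dict.getD_counter, Int.toNat_natCast,
    PySem.List.foldl_append_eq_flatMap, List.nil_append]
  rw [pv_extra_eq]
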